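-- pv_equiv track=rewrite | github.com/jklust/gamdpy | rumdpy/configuration/topology.py | dihedrals_from_angles
-- ===== SOURCE A (Python) =====
-- def dihedrals_from_angles(angles, dihedral_type):
--     dihedrals = []
--     for angle_index, angle in enumerate(angles):
--         for other_angle in angles[angle_index+1:]:
--             if angle[1] == other_angle[0] and angle[2] == other_angle[1]: # Assuming bonds inicies to be sorted! WHAT IF CYCLIC?
--                 dihedrals.append([angle[0], angle[1], angle[2], other_angle[2], dihedral_type])
--             elif other_angle[1] == angle[0] and other_angle[2] == angle[1]: # Assuming bonds inicies to be sorted!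
--                 dihedrals.append([other_angle[0], other_angle[1], other_angle[2], angle[2], dihedral_type])
--     return dihedrals
-- ===== SOURCE B (Python) =====
-- def dihedrals_from_angles(angles, dihedral_type):
--     # One pass: hash-index earlier angles by their endpoint pairs and look up
--     # matches for each new angle, grouping results by the earlier angle's index.
--     by01 = {}  # (a[0], a[1]) -> indices i in ascending order
--     by12 = {}  # (a[1], a[2]) -> indices i in ascending order
--     results = [[] for _ in angles]
--     for j, aj in enumerate(angles):
--         for i in by12.get((aj[0], aj[1]), []):  # angles[i][1:3] == aj[0:2]
--             ai = angles[i]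
--             results[i].append([ai[0], ai[1], ai[2], aj[2], dihedral_type])
--         for i in by01.get((aj[1], aj[2]), []):  # aj[1:3] == angles[i][0:2]
--             ai = angles[i]
--             if not (ai[1] == aj[0] and ai[2] == aj[1]):  # elif: first test wins
--                 results[i].append([aj[0], aj[1], aj[2], ai[2], dihedral_type])
--         by01.setdefault((aj[0], aj[1]), []).append(j)
--         by12.setdefault((aj[1], aj[2]), []).append(j)
--     return [d for res in results for d in res]
-- ===== Notes on version B (the rewrite author's own statement) =====
-- stated objective: alternative
-- what changed: A scans all O(n^2) ordered pairs of angles; B makes one pass that hash-indexes earlier angles by their (first,second) and (second,third) endpoint pairs, looks up only the matching partners for each new angle, groups output rows by the earlier angle's index and flattens.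
-- outside the precondition, e.g. on dihedrals_from_angles([[1, 2], [5, 6]], 0): A returns [], B raises IndexError; on dihedrals_from_angles([[7]], 0): A returns [], B raises IndexError
import Mathlib
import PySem

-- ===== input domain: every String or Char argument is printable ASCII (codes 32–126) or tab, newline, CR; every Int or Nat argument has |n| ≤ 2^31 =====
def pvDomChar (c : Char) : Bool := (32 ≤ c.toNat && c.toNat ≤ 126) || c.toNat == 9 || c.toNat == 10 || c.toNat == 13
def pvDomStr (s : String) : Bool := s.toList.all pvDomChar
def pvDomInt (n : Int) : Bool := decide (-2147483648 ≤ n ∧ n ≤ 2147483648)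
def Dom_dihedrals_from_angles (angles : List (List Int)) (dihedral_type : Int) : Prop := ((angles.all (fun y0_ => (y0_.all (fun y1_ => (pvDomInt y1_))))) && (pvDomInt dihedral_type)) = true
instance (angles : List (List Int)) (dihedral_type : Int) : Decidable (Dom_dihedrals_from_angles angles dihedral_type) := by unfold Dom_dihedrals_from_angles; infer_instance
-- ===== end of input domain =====

-- B replaces A's all-pairs scan by a one-pass hash index on the two endpoint-pair keys (objective: alternative).

-- ===== PORT A =====
-- Literal port of A: for each (angle_index, angle), scan angles[angle_index+1:]
-- and append a dihedral on either chaining condition (elif).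
def dihedrals_from_angles (angles : List (List Int)) (dihedral_type : Int) : List (List Int) :=
  (PySem.List.enumerate angles).foldl (fun dihedrals p =>
    (PySem.List.slice angles (some (p.1 + 1)) none).foldl (fun ds other =>
      if PySem.List.pyGetD p.2 1 0 = PySem.List.pyGetD other 0 0 ∧
         PySem.List.pyGetD p.2 2 0 = PySem.List.pyGetD other 1 0 then
        ds ++ [[PySem.List.pyGetD p.2 0 0, PySem.List.pyGetD p.2 1 0, PySem.List.pyGetD p.2 2 0,
                PySem.List.pyGetD other 2 0, dihedral_type]]
      else if PySem.List.pyGetD other 1 0 = PySem.List.pyGetD p.2 0 0 ∧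
              PySem.List.pyGetD other 2 0 = PySem.List.pyGetD p.2 1 0 then
        ds ++ [[PySem.List.pyGetD other 0 0, PySem.List.pyGetD other 1 0, PySem.List.pyGetD other 2 0,
                PySem.List.pyGetD p.2 2 0, dihedral_type]]
      else ds) dihedrals) []

-- ===== PORT B =====
-- B-side helper: the body of B's single loop over enumerate(angles).
-- State = (by01, by12, results): the two hash indexes over earlier angles and
-- the per-earlier-index result lists.
def pvBStep (angles : List (List Int)) (dihedral_type : Int)
    (st : PySem.Dict (Int × Int) (List Int) × PySem.Dict (Int × Int) (List Int) × List (List (List Int)))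
    (p : Int × List Int) :
    PySem.Dict (Int × Int) (List Int) × PySem.Dict (Int × Int) (List Int) × List (List (List Int)) :=
  let by01 := st.1
  let by12 := st.2.1
  let aj := p.2
  let k01 := (PySem.List.pyGetD aj 0 0, PySem.List.pyGetD aj 1 0)
  let k12 := (PySem.List.pyGetD aj 1 0, PySem.List.pyGetD aj 2 0)
  let results := (by12.getD k01 []).foldl (fun res i =>
      let ai := PySem.List.pyGetD angles i []
      PySem.List.pySetD res i (PySem.List.pyGetD res i [] ++
        [[PySem.List.pyGetD ai 0 0, PySem.List.pyGetD ai 1 0, PySem.List.pyGetD ai 2 0,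
          PySem.List.pyGetD aj 2 0, dihedral_type]])) st.2.2
  let results := (by01.getD k12 []).foldl (fun res i =>
      let ai := PySem.List.pyGetD angles i []
      if ¬ (PySem.List.pyGetD ai 1 0 = PySem.List.pyGetD aj 0 0 ∧
            PySem.List.pyGetD ai 2 0 = PySem.List.pyGetD aj 1 0) then
        PySem.List.pySetD res i (PySem.List.pyGetD res i [] ++
          [[PySem.List.pyGetD aj 0 0, PySem.List.pyGetD aj 1 0, PySem.List.pyGetD aj 2 0,
            PySem.List.pyGetD ai 2 0, dihedral_type]])
      else res) results
  (by01.insert k01 (by01.getD k01 [] ++ [p.1]),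
   by12.insert k12 (by12.getD k12 [] ++ [p.1]),
   results)

-- One pass: hash-index earlier angles by endpoint-pair keys, look up matches,
-- group results by the earlier angle's index, then flatten.
def dihedrals_from_angles_alt (angles : List (List Int)) (dihedral_type : Int) : List (List Int) :=
  ((PySem.List.enumerate angles).foldl (pvBStep angles dihedral_type)
    (PySem.Dict.empty, PySem.Dict.empty, angles.map (fun _ => []))).2.2.flatMap (fun r => r)

-- ===== PRECONDITION & SPEC =====
-- Pre_ restricts to the function's natural domain (angles are index triples): on
-- shorter sublists Python A raises IndexError except when a short-circuited
-- comparison happens to fail first, and B itself raises there.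
def Pre_dihedrals_from_angles (angles : List (List Int)) (dihedral_type : Int) : Prop :=
  ∀ a ∈ angles, 3 ≤ a.length
instance (angles : List (List Int)) (dihedral_type : Int) : Decidable (Pre_dihedrals_from_angles angles dihedral_type) := by unfold Pre_dihedrals_from_angles; infer_instance

def pvWitness_dihedrals_from_angles : List (List Int) × Int := ([[0, 1, 2], [1, 2, 3]], 5)

def Spec_dihedrals_from_angles (angles : List (List Int)) (dihedral_type : Int) (out : List (List Int)) : Prop := out = dihedrals_from_angles_alt angles dihedral_type
instance (angles : List (List Int)) (dihedral_type : Int) (out : List (List Int)) : Decidable (Spec_dihedrals_from_angles angles dihedral_type out) := by unfold Spec_dihedrals_from_angles; infer_instance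

-- ===== CLAIM (what is proved, stated in full; the proofs are below) =====
def Claim_equal_dihedrals_from_angles : Prop := ∀ (angles : List (List Int)) (dihedral_type : Int), Dom_dihedrals_from_angles angles dihedral_type → Pre_dihedrals_from_angles angles dihedral_type → Spec_dihedrals_from_angles angles dihedral_type (dihedrals_from_angles angles dihedral_type)

-- ===== LEMMAS AND PROOFS =====

-- Canonical per-pair match function (value level): exactly A's if/elif body.
def pvHv (t : Int) (a o : List Int) : List (List Int) :=
  if a.getD 1 0 = o.getD 0 0 ∧ a.getD 2 0 = o.getD 1 0 then
    [[a.getD 0 0, a.getD 1 0, a.getD 2 0, o.getD 2 0, t]]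
  else if o.getD 1 0 = a.getD 0 0 ∧ o.getD 2 0 = a.getD 1 0 then
    [[o.getD 0 0, o.getD 1 0, o.getD 2 0, a.getD 2 0, t]]
  else []

def pvH (angles : List (List Int)) (t : Int) (i j : Nat) : List (List Int) :=
  pvHv t (angles.getD i []) (angles.getD j [])

def pvK01 (angles : List (List Int)) (j : Nat) : Int × Int :=
  ((angles.getD j []).getD 0 0, (angles.getD j []).getD 1 0)
def pvK12 (angles : List (List Int)) (j : Nat) : Int × Int :=
  ((angles.getD j []).getD 1 0, (angles.getD j []).getD 2 0)

-- the block of output rows whose first (earlier) angle is index i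
def pvBlk (angles : List (List Int)) (t : Int) (i : Nat) : List (List Int) :=
  ((List.range angles.length).filter (fun j => decide (i < j))).flatMap (pvH angles t i)

lemma pv_filter_lt_range (n i : Nat) :
    (List.range n).filter (fun j => decide (i < j)) = List.range' (i + 1) (n - (i + 1)) := by
  induction n with
  | zero => simp
  | succ n ih =>
    rw [List.range_succ, List.filter_append, ih]
    by_cases h : i < n
    · have h1 : n + 1 - (i + 1) = (n - (i + 1)) + 1 := by omega
      rw [h1, List.range'_concat]
      simp [h]
    · have h1 : n + 1 - (i + 1) = n - (i + 1) := by omega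
      rw [h1]
      simp [h]

lemma pv_drop_eq_map_range' {α : Type} (d : α) (angles : List α) (m : Nat) :
    angles.drop m = (List.range' m (angles.length - m)).map (fun j => angles.getD j d) := by
  apply List.ext_getElem
  · simp
  · intro p h1 h2
    simp only [List.getElem_drop, List.getElem_map, List.getElem_range']
    rw [List.getD_eq_getElem]
    · simp
    · simp at h2 ⊢; omega

-- A computes, block by block, the canonical flatMap.
lemma pv_A_inner (angles : List (List Int)) (t : Int) (j : Nat) (acc : List (List Int)) :
    (PySem.List.slice angles (some ((j : Int) + 1)) none).foldl (fun ds other =>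
      if (angles.getD j []).getD 1 0 = other.getD 0 0 ∧
         (angles.getD j []).getD 2 0 = other.getD 1 0 then
        ds ++ [[(angles.getD j []).getD 0 0, (angles.getD j []).getD 1 0, (angles.getD j []).getD 2 0,
                other.getD 2 0, t]]
      else if other.getD 1 0 = (angles.getD j []).getD 0 0 ∧
              other.getD 2 0 = (angles.getD j []).getD 1 0 then
        ds ++ [[other.getD 0 0, other.getD 1 0, other.getD 2 0,
                (angles.getD j []).getD 2 0, t]]
      else ds) acc = acc ++ pvBlk angles t j := by
  have hc : ((j : Int) + 1) = ((j + 1 : Nat) : Int) := by push_cast; ring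
  rw [hc, PySem.List.slice_from_natCast]
  have hfun : (fun (ds : List (List Int)) (other : List Int) =>
      if (angles.getD j []).getD 1 0 = other.getD 0 0 ∧
         (angles.getD j []).getD 2 0 = other.getD 1 0 then
        ds ++ [[(angles.getD j []).getD 0 0, (angles.getD j []).getD 1 0, (angles.getD j []).getD 2 0,
                other.getD 2 0, t]]
      else if other.getD 1 0 = (angles.getD j []).getD 0 0 ∧
              other.getD 2 0 = (angles.getD j []).getD 1 0 then
        ds ++ [[other.getD 0 0, other.getD 1 0, other.getD 2 0,
                (angles.getD j []).getD 2 0, t]]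
      else ds) = (fun ds other => ds ++ pvHv t (angles.getD j []) other) := by
    funext ds o
    simp only [pvHv]
    split_ifs <;> simp
  rw [hfun, PySem.List.foldl_append_eq_flatMap,
      pv_drop_eq_map_range' ([] : List Int) angles (j + 1), List.flatMap_map]
  unfold pvBlk
  rw [pv_filter_lt_range]
  rfl

lemma pv_A_eq (angles : List (List Int)) (t : Int) :
    dihedrals_from_angles angles t = (List.range angles.length).flatMap (pvBlk angles t) := by
  unfold dihedrals_from_angles
  rw [PySem.List.enumerate_eq_map_pyRange angles []]
  simp only [PySem.List.len_eq]
  rw [PySem.List.pyRange_zero_nat, List.map_map, List.foldl_map]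
  simp only [Function.comp, PySem.List.pyGetD_natCast, PySem.List.pyGetD_ofNat']
  exact Eq.trans
    (PySem.List.foldl_congr_mem _ _ (fun acc j => acc ++ pvBlk angles t j) _
      (fun acc j _ => pv_A_inner angles t j acc))
    (by rw [PySem.List.foldl_append_eq_flatMap]; rfl)

-- the per-bucket loop "results[i].append(g i)" over distinct in-range indices
lemma pv_foldl_set {β : Type} (g : Nat → List β) :
    ∀ (l : List Nat) (res : List (List β)), l.Nodup → (∀ i ∈ l, i < res.length) →
      ((l.foldl (fun r i => r.set i (r.getD i [] ++ g i)) res).length = res.length ∧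
       ∀ k : Nat, (l.foldl (fun r i => r.set i (r.getD i [] ++ g i)) res).getD k [] =
         res.getD k [] ++ (if k ∈ l then g k else [])) := by
  intro l
  induction l with
  | nil => intro res _ _; simp
  | cons i tl ih =>
    intro res hnd hlen
    have hi : i < res.length := hlen i (List.mem_cons_self)
    have hnd' := (List.nodup_cons.mp hnd)
    obtain ⟨hlen', hgd⟩ := ih (res.set i (res.getD i [] ++ g i)) hnd'.2
      (by intro x hx; rw [List.length_set]; exact hlen x (List.mem_cons_of_mem _ hx))
    rw [List.foldl_cons]
    refine ⟨by rw [hlen', List.length_set], fun k => ?_⟩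
    rw [hgd k]
    by_cases hk : k = i
    · subst hk
      have hknot : k ∉ tl := hnd'.1
      simp only [hknot, if_false, List.mem_cons, or_false]
      rw [List.getD_eq_getElem?_getD, List.getElem?_set_self hi]
      simp
    · rw [List.getD_eq_getElem?_getD, List.getElem?_set_ne (fun h => hk h.symm),
          ← List.getD_eq_getElem?_getD]
      simp [List.mem_cons, hk]

-- the invariant carried by B's single pass, after m angles processed
def pvInv (angles : List (List Int)) (t : Int) (m : Nat)
    (st : PySem.Dict (Int × Int) (List Int) × PySem.Dict (Int × Int) (List Int) × List (List (List Int))) : Prop :=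
  (∀ k : Int × Int, st.1.getD k [] =
      ((List.range m).filter (fun j => decide (pvK01 angles j = k))).map (Nat.cast : Nat → Int)) ∧
  (∀ k : Int × Int, st.2.1.getD k [] =
      ((List.range m).filter (fun j => decide (pvK12 angles j = k))).map (Nat.cast : Nat → Int)) ∧
  st.2.2.length = angles.length ∧
  (∀ i : Nat, st.2.2.getD i [] =
      ((List.range m).filter (fun j => decide (i < j))).flatMap (pvH angles t i))

lemma pv_inv_init (angles : List (List Int)) (t : Int) :
    pvInv angles t 0 (PySem.Dict.empty, PySem.Dict.empty, angles.map (fun _ => [])) := by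
  refine ⟨fun k => ?_, fun k => ?_, by simp, fun i => ?_⟩
  · simp [PySem.Dict.getD_empty]
  · simp [PySem.Dict.getD_empty]
  · simp only [List.range_zero, List.filter_nil, List.flatMap_nil,
      List.getD_eq_getElem?_getD, List.getElem?_map]
    cases angles[i]? <;> simp

lemma pv_inv_step (angles : List (List Int)) (t : Int) (m : Nat) (hm : m < angles.length)
    (st : PySem.Dict (Int × Int) (List Int) × PySem.Dict (Int × Int) (List Int) × List (List (List Int)))
    (h : pvInv angles t m st) :
    pvInv angles t (m + 1) (pvBStep angles t st ((m : Int), angles.getD m [])) := by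
  obtain ⟨h01, h12, hlen, hres⟩ := h
  unfold pvInv pvBStep
  simp only [PySem.List.pyGetD_ofNat']
  simp only [h01, h12, List.foldl_map, PySem.List.pySetD_natCast, PySem.List.pyGetD_natCast]
  have hk01 : ((angles.getD m []).getD 0 0, (angles.getD m []).getD 1 0) = pvK01 angles m := rfl
  have hk12 : ((angles.getD m []).getD 1 0, (angles.getD m []).getD 2 0) = pvK12 angles m := rfl
  rw [hk01, hk12]
  rw [PySem.List.foldl_ite_eq_foldl_filter
    (p := fun i : Nat => ¬((angles.getD i []).getD 1 0 = (angles.getD m []).getD 0 0 ∧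
          (angles.getD i []).getD 2 0 = (angles.getD m []).getD 1 0))]
  set l1 := (List.range m).filter (fun j => decide (pvK12 angles j = pvK01 angles m)) with hl1
  set l2' := ((List.range m).filter (fun j => decide (pvK01 angles j = pvK12 angles m))).filter
      (fun x => decide ¬((angles.getD x []).getD 1 0 = (angles.getD m []).getD 0 0 ∧
        (angles.getD x []).getD 2 0 = (angles.getD m []).getD 1 0)) with hl2
  have hnd1 : l1.Nodup := List.Nodup.filter _ List.nodup_range
  have hnd2 : l2'.Nodup := List.Nodup.filter _ (List.Nodup.filter _ List.nodup_range)
  have hb1 : ∀ i ∈ l1, i < st.2.2.length := by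
    intro i hi
    have := List.mem_range.mp (List.mem_of_mem_filter hi)
    omega
  obtain ⟨hL1, hG1⟩ := pv_foldl_set
    (fun y => [[(angles.getD y []).getD 0 0, (angles.getD y []).getD 1 0,
                (angles.getD y []).getD 2 0, (angles.getD m []).getD 2 0, t]])
    l1 st.2.2 hnd1 hb1
  have hb2 : ∀ i ∈ l2', i < (l1.foldl (fun (x : List (List (List Int))) y =>
      x.set y (x.getD y [] ++ [[(angles.getD y []).getD 0 0, (angles.getD y []).getD 1 0,
        (angles.getD y []).getD 2 0, (angles.getD m []).getD 2 0, t]])) st.2.2).length := by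
    intro i hi
    have := List.mem_range.mp (List.mem_of_mem_filter (List.mem_of_mem_filter hi))
    rw [hL1]
    omega
  obtain ⟨hL2, hG2⟩ := pv_foldl_set
    (fun y => [[(angles.getD m []).getD 0 0, (angles.getD m []).getD 1 0,
                (angles.getD m []).getD 2 0, (angles.getD y []).getD 2 0, t]])
    l2' _ hnd2 hb2
  refine ⟨fun k => ?_, fun k => ?_, ?_, fun i => ?_⟩
  · rw [PySem.Dict.getD_insert, List.range_succ, List.filter_append, List.map_append]
    by_cases hk : k = pvK01 angles m
    · subst hk
      simp
    · rw [if_neg hk]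
      have hk' : ¬(pvK01 angles m = k) := fun h => hk h.symm
      simp [hk', h01]
  · rw [PySem.Dict.getD_insert, List.range_succ, List.filter_append, List.map_append]
    by_cases hk : k = pvK12 angles m
    · subst hk
      simp
    · rw [if_neg hk]
      have hk' : ¬(pvK12 angles m = k) := fun h => hk h.symm
      simp [hk', h12]
  · rw [hL2, hL1, hlen]
  · rw [hG2 i, hG1 i, hres i]
    rw [List.range_succ, List.filter_append, List.flatMap_append, List.append_assoc]
    congr 1
    have hm1 : i ∈ l1 ↔ i < m ∧ ((angles.getD i []).getD 1 0 = (angles.getD m []).getD 0 0 ∧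
        (angles.getD i []).getD 2 0 = (angles.getD m []).getD 1 0) := by
      rw [hl1]
      simp [List.mem_filter, List.mem_range, pvK12, pvK01, Prod.ext_iff]
    have hm2 : i ∈ l2' ↔ i < m ∧ ((angles.getD i []).getD 0 0 = (angles.getD m []).getD 1 0 ∧
        (angles.getD i []).getD 1 0 = (angles.getD m []).getD 2 0) ∧
        ¬((angles.getD i []).getD 1 0 = (angles.getD m []).getD 0 0 ∧
          (angles.getD i []).getD 2 0 = (angles.getD m []).getD 1 0) := by
      rw [hl2]
      simp [List.mem_filter, List.mem_range, pvK01, pvK12, Prod.ext_iff, and_assoc]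
      tauto
    by_cases him : i < m
    · have : (List.filter (fun j => decide (i < j)) [m]) = [m] := by simp [him]
      rw [this]
      simp only [List.flatMap_cons, List.flatMap_nil, List.append_nil]
      unfold pvH pvHv
      by_cases hc1 : (angles.getD i []).getD 1 0 = (angles.getD m []).getD 0 0 ∧
          (angles.getD i []).getD 2 0 = (angles.getD m []).getD 1 0
      · rw [if_pos hc1, if_pos (hm1.mpr ⟨him, hc1⟩)]
        have : i ∉ l2' := fun h => ((hm2.mp h).2.2) hc1
        simp [this]
      · rw [if_neg hc1]
        have h1 : i ∉ l1 := fun h => hc1 (hm1.mp h).2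
        by_cases hc2 : (angles.getD m []).getD 1 0 = (angles.getD i []).getD 0 0 ∧
            (angles.getD m []).getD 2 0 = (angles.getD i []).getD 1 0
        · rw [if_pos hc2, if_pos (hm2.mpr ⟨him, ⟨hc2.1.symm, hc2.2.symm⟩, hc1⟩)]
          simp [h1]
        · rw [if_neg hc2]
          have h2 : i ∉ l2' := fun h => hc2 ⟨(hm2.mp h).2.1.1.symm, (hm2.mp h).2.1.2.symm⟩
          simp [h1, h2]
    · have : (List.filter (fun j => decide (i < j)) [m]) = [] := by simp [him]
      rw [this]
      have h1 : i ∉ l1 := fun h => him (hm1.mp h).1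
      have h2 : i ∉ l2' := fun h => him (hm2.mp h).1
      simp [h1, h2]

lemma pv_inv_fold (angles : List (List Int)) (t : Int) (m : Nat) (hm : m ≤ angles.length) :
    pvInv angles t m ((List.range m).foldl (fun st (j : Nat) => pvBStep angles t st ((j : Int), angles.getD j []))
      (PySem.Dict.empty, PySem.Dict.empty, angles.map (fun _ => []))) := by
  induction m with
  | zero => simpa using pv_inv_init angles t
  | succ m ih =>
    rw [List.range_succ, List.foldl_append, List.foldl_cons, List.foldl_nil]
    exact pv_inv_step angles t m (by omega) _ (ih (by omega))

lemma pv_B_eq (angles : List (List Int)) (t : Int) :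
    dihedrals_from_angles_alt angles t = (List.range angles.length).flatMap (pvBlk angles t) := by
  unfold dihedrals_from_angles_alt
  rw [PySem.List.enumerate_eq_map_pyRange angles []]
  simp only [PySem.List.len_eq]
  rw [PySem.List.pyRange_zero_nat, List.map_map, List.foldl_map]
  simp only [Function.comp, PySem.List.pyGetD_natCast]
  obtain ⟨-, -, hlen, hres⟩ := pv_inv_fold angles t angles.length le_rfl
  have hlist : ((List.range angles.length).foldl
      (fun st (j : Nat) => pvBStep angles t st ((j : Int), angles.getD j []))
      (PySem.Dict.empty, PySem.Dict.empty, angles.map (fun _ => []))).2.2 =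
      (List.range angles.length).map (pvBlk angles t) := by
    apply List.ext_getElem
    · rw [hlen, List.length_map, List.length_range]
    · intro p h1 h2
      have h3 := hres p
      rw [List.getD_eq_getElem?_getD, List.getElem?_eq_getElem h1] at h3
      simp only [Option.getD_some] at h3
      rw [h3, List.getElem_map, List.getElem_range]
      rfl
  rw [hlist, List.flatMap_map]

-- ===== VERDICT (by name: the statement is the Claim_ definition above) =====
theorem dihedrals_from_angles_spec : Claim_equal_dihedrals_from_angles := by
  intro angles t _ _
  unfold Spec_dihedrals_from_angles
  rw [pv_A_eq, pv_B_eq]
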